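-- pv_equiv track=rewrite | github.com/kanhaiyakumartech/PythonRepo | src/Assignment_15/util.py | to_check_piling
-- ===== SOURCE A (Python) =====
-- def to_check_piling(test_cases):
--     results = []
--
--     for n, sl in test_cases:
--         while len(sl) > 1 and (sl[0] >= sl[-1]):
--             a = sl.pop(0) if sl[0] >= sl[-1] else sl.pop()
--
--             if sl and (sl[0] > a or sl[-1] > a):
--                 results.append("No")
--                 break
--         else:
--             results.append("Yes")
--
--     return results
-- ===== SOURCE B (Python) =====
-- def to_check_piling(test_cases):
--     # Non-mutating index-sweep re-implementation (A pops from the front of sl in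
--     # place; the return value is identical, but B leaves sl untouched).
--     results = []
--     for n, sl in test_cases:
--         k = 0
--         while k < len(sl) - 1 and sl[k] >= sl[-1]:
--             k += 1
--         # A pops exactly sl[0..k-1]; it says "No" iff some popped element is
--         # followed by a strictly larger one.
--         results.append("No" if any(sl[j] < sl[j + 1] for j in range(k)) else "Yes")
--     return results
-- ===== Notes on version B (the rewrite author's own statement) =====
-- stated objective: alternative
-- what changed: B replaces A's destructive pop(0) loop with break/for-else by an index sweep that first finds how many front elements A would pop (k) and then a single any() scan for an adjacent ascent among those k pairs; B does not mutate sl (A pops it in place), and avoids pop(0)'s quadratic worst case though that was not measurably faster on the generated inputs.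
import Mathlib
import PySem

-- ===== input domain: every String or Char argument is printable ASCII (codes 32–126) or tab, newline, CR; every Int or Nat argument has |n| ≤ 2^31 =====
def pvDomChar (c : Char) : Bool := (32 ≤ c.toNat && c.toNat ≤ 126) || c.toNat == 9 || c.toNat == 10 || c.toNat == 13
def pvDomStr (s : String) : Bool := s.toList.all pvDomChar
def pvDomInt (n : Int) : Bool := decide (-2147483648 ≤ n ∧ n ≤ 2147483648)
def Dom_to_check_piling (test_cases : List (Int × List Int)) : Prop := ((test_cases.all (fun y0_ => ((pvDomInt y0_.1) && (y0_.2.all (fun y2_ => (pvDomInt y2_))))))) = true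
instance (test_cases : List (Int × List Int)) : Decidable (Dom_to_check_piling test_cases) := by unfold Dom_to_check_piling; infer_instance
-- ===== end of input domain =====

-- B is an index-sweep re-implementation of A (no pop(0)); A mutates each sl in place,
-- B does not — the equivalence proved here is about the RETURN value only.

-- ===== PORT A =====
-- A's inner while loop.  The loop guard guarantees sl is nonempty, so Python's
-- total sl[0] / sl[-1] are exactly headD / getLastD here; the ternary
-- 'sl.pop(0) if sl[0] >= sl[-1] else sl.pop()' is transcribed as the inner
-- if-then-else (with a = the popped value substituted in each branch).
def pileLoopA (sl : List Int) : String :=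
  if _h : 1 < sl.length ∧ sl.headD 0 ≥ sl.getLastD 0 then
    if sl.headD 0 ≥ sl.getLastD 0 then
      -- a = sl.pop(0)
      if sl.tail ≠ [] ∧ (sl.tail.headD 0 > sl.headD 0 ∨ sl.tail.getLastD 0 > sl.headD 0) then "No"
      else pileLoopA sl.tail
    else
      -- a = sl.pop()
      if sl.dropLast ≠ [] ∧ (sl.dropLast.headD 0 > sl.getLastD 0 ∨ sl.dropLast.getLastD 0 > sl.getLastD 0) then "No"
      else pileLoopA sl.dropLast
  else "Yes"
termination_by sl.length
decreasing_by
  · simp only [List.length_tail]; omega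
  · simp only [List.length_dropLast]; omega

def to_check_piling (test_cases : List (Int × List Int)) : List String :=
  test_cases.foldl (fun results p => results ++ [pileLoopA p.2]) []

-- ===== PORT B =====
-- B's inner while loop: advance k while k < len(sl)-1 and sl[k] >= sl[-1].
def pileK (sl : List Int) (k : Nat) : Nat :=
  if k < sl.length - 1 ∧ (PySem.List.pyGet? sl (k : Int)).getD 0 ≥ (PySem.List.pyGet? sl (-1)).getD 0 then
    pileK sl (k + 1)
  else k
termination_by sl.length - k

-- B's per-case body: "No" iff any j in range(k) has sl[j] < sl[j+1].
def pileCaseB (sl : List Int) : String :=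
  if (List.range (pileK sl 0)).any
      (fun j => decide ((PySem.List.pyGet? sl (j : Int)).getD 0 < (PySem.List.pyGet? sl ((j : Int) + 1)).getD 0))
  then "No" else "Yes"

def to_check_piling_alt (test_cases : List (Int × List Int)) : List String :=
  test_cases.foldl (fun results p => results ++ [pileCaseB p.2]) []

-- ===== PRECONDITION & SPEC =====
def Spec_to_check_piling (test_cases : List (Int × List Int)) (out : List String) : Prop := out = to_check_piling_alt test_cases
instance (test_cases : List (Int × List Int)) (out : List String) : Decidable (Spec_to_check_piling test_cases out) := by unfold Spec_to_check_piling; infer_instance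

-- ===== CLAIM (what is proved, stated in full; the proofs are below) =====
def Claim_equal_to_check_piling : Prop := ∀ (test_cases : List (Int × List Int)), Dom_to_check_piling test_cases → Spec_to_check_piling test_cases (to_check_piling test_cases)

-- ===== LEMMAS AND PROOFS =====

-- structural version of B's counter: how many front elements A pops (last fixed)
def cnt (last : Int) : List Int → Nat
  | x :: y :: r => if x ≥ last then cnt last (y :: r) + 1 else 0
  | _ => 0

-- structural version of B's any-over-range: is there an ascent among the first k pairs?
def asc : List Int → Nat → Bool
  | x :: y :: r, k + 1 => (decide (x < y)) || asc (y :: r) k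
  | _, _ => false

theorem cnt_nil (last : Int) : cnt last [] = 0 := rfl
theorem cnt_one (last x : Int) : cnt last [x] = 0 := rfl
theorem cnt_cc (last x y : Int) (r : List Int) :
    cnt last (x :: y :: r) = if x ≥ last then cnt last (y :: r) + 1 else 0 := rfl

theorem cnt_short (last : Int) (sl : List Int) (h : sl.length ≤ 1) : cnt last sl = 0 := by
  match sl with
  | [] => rfl
  | [x] => rfl
  | x :: y :: r => simp at h

theorem getLastD_eq (sl : List Int) : sl.getLastD 0 = (PySem.List.pyGet? sl (-1)).getD 0 := by
  rw [PySem.List.pyGet?_neg_one]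
  cases sl with
  | nil => rfl
  | cons x t => simp [List.getLastD_eq_getLast?]

theorem pileK_eq_cnt (sl : List Int) (k : Nat) (hk : k ≤ sl.length) :
    pileK sl k = k + cnt (sl.getLastD 0) (sl.drop k) := by
  induction hn : sl.length - k generalizing k with
  | zero =>
    have hk' : k = sl.length := by omega
    rw [pileK]
    have : ¬ (k < sl.length - 1 ∧ (PySem.List.pyGet? sl (k : Int)).getD 0 ≥ (PySem.List.pyGet? sl (-1)).getD 0) := by
      intro ⟨h1, _⟩; omega
    rw [if_neg this, hk', List.drop_length, cnt_nil]
    omega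
  | succ n ih =>
    have hklt : k < sl.length := by omega
    have hdrop : sl.drop k = sl[k] :: sl.drop (k + 1) := List.drop_eq_getElem_cons hklt
    have hget : (PySem.List.pyGet? sl (k : Int)).getD 0 = sl[k] := by
      rw [PySem.List.pyGet?_natCast, List.getElem?_eq_getElem hklt]; rfl
    rw [pileK]
    by_cases hg : k < sl.length - 1 ∧ (PySem.List.pyGet? sl (k : Int)).getD 0 ≥ (PySem.List.pyGet? sl (-1)).getD 0
    · rw [if_pos hg, ih (k + 1) (by omega) (by omega)]
      have hne : sl.drop (k + 1) ≠ [] := by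
        intro h
        have := List.length_drop (l := sl) (i := k + 1)
        rw [h] at this
        simp at this
        omega
      rw [hdrop]
      match hd : sl.drop (k + 1), hne with
      | y :: r, _ =>
        rw [cnt_cc]
        have hx : sl[k] ≥ sl.getLastD 0 := by
          rw [getLastD_eq, ← hget]; exact hg.2
        rw [if_pos hx, ← hd]
        omega
    · rw [if_neg hg]
      rcases Decidable.not_and_iff_or_not.mp hg with h1 | h2
      · -- k ≥ length - 1 : drop k has at most one element
        rw [cnt_short _ _ (by simp [List.length_drop]; omega)]
        omega
      · -- sl[k] < last
        rw [hdrop]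
        cases hd : sl.drop (k + 1) with
        | nil => rw [cnt_one]; omega
        | cons y r =>
          rw [cnt_cc]
          have hx : ¬ sl[k] ≥ sl.getLastD 0 := by
            rw [getLastD_eq, ← hget]; exact fun h => h2 h
          rw [if_neg hx]
          omega

theorem asc_zero (sl : List Int) : asc sl 0 = false := by
  match sl with
  | [] => rfl
  | [x] => rfl
  | x :: y :: r => rfl

theorem any_range_eq_asc (sl : List Int) (k : Nat) (hk : k < sl.length) :
    (List.range k).any
      (fun j => decide ((PySem.List.pyGet? sl (j : Int)).getD 0 < (PySem.List.pyGet? sl ((j : Int) + 1)).getD 0))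
      = asc sl k := by
  induction k generalizing sl with
  | zero => simp [asc_zero]
  | succ k ih =>
    match sl with
    | x :: y :: r =>
      rw [List.range_succ_eq_map]
      rw [show asc (x :: y :: r) (k + 1) = ((decide (x < y)) || asc (y :: r) k) from rfl]
      simp only [List.any_cons, List.any_map]
      have h0 : (PySem.List.pyGet? (x :: y :: r) ((0 : Nat) : Int)).getD 0 = x := by
        simp
      have h1 : (PySem.List.pyGet? (x :: y :: r) (((0 : Nat) : Int) + 1)).getD 0 = y := by
        norm_num [PySem.List.pyGet?_natCast]
      congr 1
      · rw [h0, h1]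
      · have hk' : k < (y :: r).length := by simp at hk ⊢; omega
        rw [← ih (y :: r) hk']
        refine List.any_congr rfl (fun j => ?_)
        simp only [Function.comp]
        have e1 : ((j + 1 : Nat) : Int) = (j : Int) + 1 := by push_cast; ring
        have e2 : PySem.List.pyGet? (x :: y :: r) ((j : Int) + 1) = PySem.List.pyGet? (y :: r) (j : Int) :=
          PySem.List.pyGet?_cons_succ _ _ _
        have e3 : PySem.List.pyGet? (x :: y :: r) ((j : Int) + 1 + 1) = PySem.List.pyGet? (y :: r) ((j : Int) + 1) := by
          have h := PySem.List.pyGet?_cons_succ x (y :: r) (j + 1)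
          rw [e1] at h
          exact h
        rw [e1, e2, e3]
    | [x] => simp at hk
    | [] => simp at hk

theorem cnt_lt_length (last : Int) (sl : List Int) : cnt last sl < sl.length ∨ sl = [] := by
  match sl with
  | [] => right; rfl
  | [x] => left; rw [cnt_one]; simp
  | x :: y :: r =>
    left
    rw [cnt_cc]
    rcases cnt_lt_length last (y :: r) with h | h
    · split <;> simp at h ⊢
      omega
    · simp at h

theorem asc_cc (x y : Int) (r : List Int) (k : Nat) :
    asc (x :: y :: r) (k + 1) = ((decide (x < y)) || asc (y :: r) k) := rfl

theorem getLastD_cons_cons (x y : Int) (r : List Int) :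
    (x :: y :: r).getLastD 0 = (y :: r).getLastD 0 := by
  simp

theorem pileCaseB_eq (sl : List Int) :
    pileCaseB sl = if asc sl (cnt (sl.getLastD 0) sl) then "No" else "Yes" := by
  have hK : pileK sl 0 = cnt (sl.getLastD 0) sl := by
    simpa using pileK_eq_cnt sl 0 (by omega)
  unfold pileCaseB
  rw [hK]
  rcases cnt_lt_length (sl.getLastD 0) sl with h | h
  · rw [any_range_eq_asc _ _ h]
  · subst h
    rw [cnt_nil]
    simp [asc_zero]

theorem pileLoopA_eq (sl : List Int) :
    pileLoopA sl = if asc sl (cnt (sl.getLastD 0) sl) then "No" else "Yes" := by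
  induction sl with
  | nil => rw [pileLoopA, cnt_nil]; simp [asc_zero]
  | cons x t ih =>
    cases t with
    | nil =>
      rw [pileLoopA, cnt_one]
      simp [asc_zero]
    | cons y r =>
      rw [pileLoopA]
      have hlast := getLastD_cons_cons x y r
      rw [hlast, cnt_cc]
      by_cases hx : x ≥ (y :: r).getLastD 0
      · have hguard : 1 < (x :: y :: r).length ∧ (x :: y :: r).headD 0 ≥ (y :: r).getLastD 0 := by
          refine ⟨by simp, by simpa using hx⟩
        rw [dif_pos hguard, if_pos (show (x :: y :: r).headD 0 ≥ (y :: r).getLastD 0 by simpa using hx), if_pos hx]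
        simp only [List.tail_cons, List.headD_cons]
        by_cases hxy : y > x
        · rw [if_pos ⟨by simp, Or.inl hxy⟩, asc_cc]
          simp [hxy]
        · have hcond : ¬ ((y :: r) ≠ [] ∧ (y > x ∨ (y :: r).getLastD 0 > x)) := by
            intro ⟨_, hor⟩
            rcases hor with h | h
            · exact hxy h
            · omega
          rw [if_neg hcond, ih, asc_cc]
          have : decide (x < y) = false := by simpa using hxy
          rw [this, Bool.false_or]
      · have hguard : ¬ (1 < (x :: y :: r).length ∧ (x :: y :: r).headD 0 ≥ (y :: r).getLastD 0) := by
          intro ⟨_, h⟩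
          simp at h
          exact hx h
        rw [dif_neg hguard, if_neg hx]
        simp [asc_zero]

theorem case_eq (sl : List Int) : pileLoopA sl = pileCaseB sl := by
  rw [pileLoopA_eq, pileCaseB_eq]

-- ===== VERDICT (by name: the statement is the Claim_ definition above) =====
theorem to_check_piling_spec : Claim_equal_to_check_piling := by
  intro tcs _
  unfold Spec_to_check_piling to_check_piling to_check_piling_alt
  simp only [case_eq]
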